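-- pv_equiv track=rewrite | github.com/Andreas235/DDS1-Prosjekt | rsa_montgomery/montgomery.py | montgomery_redc_bin
-- ===== SOURCE A (Python) =====
-- R_BITS = 256
--
-- def montgomery_redc_bin(T: int, n: int, R_bits: int = R_BITS) -> int:
--     """
--     Binary Montgomery reduction:
--       REDC(T) = T * R^{-1} mod n, for R = 2^R_bits (here R_bits=256).
--     Preconditions: n odd, 0 <= T, and final result < n.
--     """
--     for _ in range(R_bits):
--         if T & 1:
--             T = (T + n) >> 1
--         else:
--             T >>= 1
--     if T >= n:
--         T -= n
--     return T
-- ===== SOURCE B (Python) =====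
-- R_BITS = 256
--
-- def montgomery_redc_bin(T: int, n: int, R_bits: int = R_BITS) -> int:
--     """
--     Montgomery reduction REDC(T) = T * R^{-1} mod n for R = 2^R_bits, n odd,
--     in closed form: m = T * (-n)^{-1} mod R, then (T + m*n) / R, followed by
--     a conditional subtraction.  With no bits to reduce only the conditional
--     subtraction applies.
--     """
--     if R_bits > 0:
--         R = 1 << R_bits
--         m = (T * pow(-n, -1, R)) % R
--         T = (T + m * n) >> R_bits
--     return T - n if T >= n else T
-- ===== Notes on version B (the rewrite author's own statement) =====
-- stated objective: alternative
-- what changed: Replaced the R_bits-iteration bit-by-bit halving loop by the closed-form Montgomery REDC: m = (T * (-n)^{-1} mod R) mod R, t = (T + m*n) >> R_bits, conditional subtract — a constant number of big-int multiplications instead of a loop of big-int additions/shifts. B computes the modular inverse only when there are bits to reduce, so Pre_ is 'n odd (the docstring's stated precondition) or R_bits <= 0': on even n with positive R_bits A still returns a (meaningless) value while B's pow(-n, -1, R) naturally raises ValueError.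
-- outside the precondition, e.g. on montgomery_redc_bin(5, 4, 3): A returns 1, B raises ValueError; on montgomery_redc_bin(10, 6, 2): A returns 5, B raises ValueError
import Mathlib
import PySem

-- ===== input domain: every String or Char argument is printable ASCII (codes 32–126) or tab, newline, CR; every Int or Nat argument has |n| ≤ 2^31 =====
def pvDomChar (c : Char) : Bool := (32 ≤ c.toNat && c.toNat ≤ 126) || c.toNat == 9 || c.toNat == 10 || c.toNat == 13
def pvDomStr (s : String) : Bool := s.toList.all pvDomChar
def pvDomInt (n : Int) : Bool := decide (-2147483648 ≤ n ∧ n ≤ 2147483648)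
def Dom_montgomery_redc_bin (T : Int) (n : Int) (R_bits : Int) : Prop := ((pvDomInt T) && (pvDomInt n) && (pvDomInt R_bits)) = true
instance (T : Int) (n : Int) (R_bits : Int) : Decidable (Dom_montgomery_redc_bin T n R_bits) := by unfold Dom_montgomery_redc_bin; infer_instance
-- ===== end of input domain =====

-- B replaces A's R_bits-step halving loop by the closed-form Montgomery REDC
-- (one modular inverse and two multiplications); equal on the stated domain
-- (n odd, or no bits to reduce), outside which B's modular inverse raises.


-- ===== PORT A =====
-- literal port of the bit-by-bit loop: each of range(R_bits) iterations halves T,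
-- adding n first when T is odd (`T & 1` truth-tests as `T % 2 = 1`; `>> 1` is floor division by 2)
def montgomery_redc_bin (T : Int) (n : Int) (R_bits : Int) : Int :=
  let t := (PySem.List.pyRange 0 R_bits 1).foldl
    (fun t _ => if t % 2 = 1 then PySem.Int.floordiv (t + n) 2 else PySem.Int.floordiv t 2) T
  if t ≥ n then t - n else t

-- ===== PORT B =====
-- closed-form REDC; `pow(-n, -1, R)` is ported as the Bezout coefficient `Int.gcdA (-n) R % R`
-- (the unique inverse of -n in [0, R), exact on the odd n that Pre_ admits);
-- `1 << R_bits` / `>> R_bits` are exact for the R_bits ≥ 0 that Pre_ admits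
def montgomery_redc_bin_alt (T : Int) (n : Int) (R_bits : Int) : Int :=
  if R_bits > 0 then
    let R : Int := 2 ^ R_bits.toNat
    let ninv : Int := Int.gcdA (-n) R % R
    let m : Int := (T * ninv) % R
    let t : Int := PySem.Int.floordiv (T + m * n) R
    if t ≥ n then t - n else t
  else
    if T ≥ n then T - n else T

-- ===== PRECONDITION & SPEC =====
-- Pre_ is exactly where B returns: B computes the modular inverse pow(-n, -1, R) only when
-- there are bits to reduce, and that inverse exists only for odd n (the docstring's stated
-- precondition); on even n with positive R_bits A still returns a (meaningless) value while
-- B naturally raises ValueError, so exactly those inputs are excluded.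
def Pre_montgomery_redc_bin (T : Int) (n : Int) (R_bits : Int) : Prop :=
  n % 2 = 1 ∨ R_bits ≤ 0
instance (T : Int) (n : Int) (R_bits : Int) : Decidable (Pre_montgomery_redc_bin T n R_bits) := by
  unfold Pre_montgomery_redc_bin; infer_instance

def pvWitness_montgomery_redc_bin : Int × Int × Int := (7, 13, 4)

def Spec_montgomery_redc_bin (T : Int) (n : Int) (R_bits : Int) (out : Int) : Prop := out = montgomery_redc_bin_alt T n R_bits
instance (T : Int) (n : Int) (R_bits : Int) (out : Int) : Decidable (Spec_montgomery_redc_bin T n R_bits out) := by unfold Spec_montgomery_redc_bin; infer_instance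

-- ===== CLAIM (what is proved, stated in full; the proofs are below) =====
def Claim_equal_montgomery_redc_bin : Prop := ∀ (T : Int) (n : Int) (R_bits : Int), Dom_montgomery_redc_bin T n R_bits → Pre_montgomery_redc_bin T n R_bits → Spec_montgomery_redc_bin T n R_bits (montgomery_redc_bin T n R_bits)

-- ===== LEMMAS AND PROOFS =====

/-- A's loop body as a function. -/
def mrStep (n t : Int) : Int :=
  if t % 2 = 1 then PySem.Int.floordiv (t + n) 2 else PySem.Int.floordiv t 2

/-- A's loop, iterated k times. -/
def mrLoop (n : Int) : Nat → Int → Int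
  | 0, t => t
  | k + 1, t => mrLoop n k (mrStep n t)

theorem foldl_mrStep (n : Int) (l : List Int) (t : Int) :
    l.foldl (fun t _ => if t % 2 = 1 then PySem.Int.floordiv (t + n) 2 else PySem.Int.floordiv t 2) t
      = mrLoop n l.length t := by
  induction l generalizing t with
  | nil => rfl
  | cons a l ih => simpa [mrLoop, mrStep] using ih (mrStep n t)

theorem mrStep_eq (n t : Int) (hn : n % 2 = 1) :
    mrStep n t = (t + (t % 2) * n) / 2 ∧ (2 : Int) ∣ (t + (t % 2) * n) := by
  unfold mrStep
  rw [PySem.Int.floordiv_eq_ediv_of_pos (by norm_num : (0:Int) < 2),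
      PySem.Int.floordiv_eq_ediv_of_pos (by norm_num : (0:Int) < 2)]
  rcases Int.emod_two_eq t with h | h <;> rw [h] <;> norm_num <;> omega

/-- Core invariant: if `m ∈ [0, 2^k)` makes `t + m*n` divisible by `2^k` (n odd),
    the loop computes exactly `(t + m*n) / 2^k`. -/
theorem mrLoop_eq (n : Int) (hn : n % 2 = 1) :
    ∀ (k : Nat) (t m : Int), 0 ≤ m → m < 2 ^ k → ((2:Int) ^ k ∣ (t + m * n)) →
      mrLoop n k t = (t + m * n) / 2 ^ k := by
  intro k
  induction k with
  | zero =>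
    intro t m h0 h1 _
    have hm : m = 0 := by
      have : (2:Int) ^ 0 = 1 := pow_zero 2
      omega
    simp [mrLoop, hm]
  | succ k ih =>
    intro t m h0 h1 hdvd
    have hw : n = 2 * (n / 2) + 1 := by omega
    obtain ⟨q, hq⟩ := hdvd
    have hpow : (2:Int) ^ (k + 1) = 2 * 2 ^ k := by ring
    set c := t % 2 with hcdef
    have hc : m % 2 = c := by
      have hmn : m * n = 2 * (m * (n / 2)) + m := by linear_combination m * hw
      have h2 : t + m * n = 2 * (2 ^ k * q) := by rw [hq, hpow]; ring
      set p := m * (n / 2) with hp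
      set r := (2:Int) ^ k * q with hr
      omega
    set m' := m / 2 with hm'def
    have hm2 : m = 2 * m' + c := by omega
    have hstep := mrStep_eq n t hn
    obtain ⟨u, hu⟩ := hstep.2
    have hsval : mrStep n t = u := by
      rw [hstep.1, hu, Int.mul_ediv_cancel_left u (by norm_num : (2:Int) ≠ 0)]
    have hkey : u + m' * n = 2 ^ k * q := by
      have e1 : t + m * n = 2 * (u + m' * n) := by
        calc t + m * n = (t + c * n) + 2 * (m' * n) := by rw [hm2]; ring
          _ = 2 * u + 2 * (m' * n) := by rw [hu]
          _ = 2 * (u + m' * n) := by ring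
      have e2 : 2 * (u + m' * n) = 2 * (2 ^ k * q) := by
        rw [← e1, hq, hpow]; ring
      exact mul_left_cancel₀ (by norm_num : (2:Int) ≠ 0) e2
    have hb1 : m' < 2 ^ k := by omega
    have ihres := ih (mrStep n t) m' (by omega) hb1 ⟨q, by rw [hsval, hkey]⟩
    show mrLoop n k (mrStep n t) = (t + m * n) / 2 ^ (k + 1)
    rw [ihres, hsval, hkey, hq,
        Int.mul_ediv_cancel_left q (by positivity : ((2:Int) ^ k) ≠ 0),
        Int.mul_ediv_cancel_left q (by positivity : ((2:Int) ^ (k + 1)) ≠ 0)]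

/-- For odd n, `-n` is invertible mod `2^k` and `gcdA` provides the inverse. -/
theorem gcdA_inv (n : Int) (hn : n % 2 = 1) (k : Nat) :
    ((-n) * Int.gcdA (-n) (2 ^ k)) % (2 ^ k) = 1 % (2 ^ k) := by
  have hg : Int.gcd (-n) ((2:Int) ^ k) = 1 := by
    have hodd : Odd n.natAbs := by
      rcases Int.even_or_odd n with h | h
      · exfalso; obtain ⟨r, hr⟩ := h; omega
      · exact Int.natAbs_odd.mpr h
    have hc2 : Nat.Coprime n.natAbs 2 := Nat.coprime_two_right.mpr hodd
    have : Nat.Coprime n.natAbs (2 ^ k) := Nat.Coprime.pow_right k hc2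
    simpa [Int.gcd, Int.natAbs_pow] using this
  have hb := Int.gcd_eq_gcd_ab (-n) ((2:Int) ^ k)
  rw [hg] at hb
  push_cast at hb
  -- 1 = (-n) * gcdA + 2^k * gcdB
  have : ((-n) * Int.gcdA (-n) (2 ^ k)) % (2 ^ k)
      = ((-n) * Int.gcdA (-n) (2 ^ k) + 2 ^ k * Int.gcdB (-n) (2 ^ k)) % (2 ^ k) := by
    simp [Int.add_mul_emod_self_left]
  rw [this, ← hb]

/-- The closed form as computed by B equals A's loop, for odd n. -/
theorem redc_core (T n : Int) (k : Nat) (hn : n % 2 = 1) :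
    mrLoop n k T
      = PySem.Int.floordiv (T + (T * (Int.gcdA (-n) (2 ^ k) % 2 ^ k)) % 2 ^ k * n) (2 ^ k) := by
  have hRpos : (0:Int) < 2 ^ k := by positivity
  rw [PySem.Int.floordiv_eq_ediv_of_pos hRpos]
  set R : Int := 2 ^ k with hR
  set ninv : Int := Int.gcdA (-n) R % R with hninv
  set m : Int := (T * ninv) % R with hm
  have hm0 : 0 ≤ m := Int.emod_nonneg _ (by omega)
  have hm1 : m < R := Int.emod_lt_of_pos _ hRpos
  have hdvd : R ∣ (T + m * n) := by
    have h1 : Int.ModEq R ((-n) * Int.gcdA (-n) R) 1 := gcdA_inv n hn k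
    have hninvmod : Int.ModEq R ninv (Int.gcdA (-n) R) :=
      Int.emod_emod_of_dvd _ (dvd_refl R)
    have h2 : Int.ModEq R ((-n) * ninv) 1 := (hninvmod.mul_left (-n)).trans h1
    have hmmod : Int.ModEq R m (T * ninv) := Int.emod_emod_of_dvd _ (dvd_refl R)
    have h3 : Int.ModEq R (T + m * n) (T + (T * ninv) * n) :=
      (hmmod.mul_right n).add_left T
    have h6 : Int.ModEq R (T + m * n) 0 := by
      calc T + m * n ≡ T + (T * ninv) * n [ZMOD R] := h3
        _ = T * 1 - T * ((-n) * ninv) := by ring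
        _ ≡ T * 1 - T * 1 [ZMOD R] := (Int.ModEq.refl (T * 1)).sub (h2.mul_left T)
        _ = 0 := by ring
    exact (Int.modEq_zero_iff_dvd).mp h6
  exact mrLoop_eq n hn k T m hm0 hm1 hdvd

-- ===== VERDICT (by name: the statement is the Claim_ definition above) =====
theorem montgomery_redc_bin_spec : Claim_equal_montgomery_redc_bin := by
  intro T n R_bits _ hpre
  unfold Spec_montgomery_redc_bin
  simp only [montgomery_redc_bin, montgomery_redc_bin_alt]
  have hlen : (PySem.List.pyRange 0 R_bits 1).length = R_bits.toNat := by
    rw [PySem.List.length_pyRange_one]; simp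
  by_cases hpos : R_bits > 0
  · have hn : n % 2 = 1 := by rcases hpre with h | h; exacts [h, by omega]
    rw [if_pos hpos, foldl_mrStep, hlen, redc_core T n R_bits.toNat hn]
  · have h0 : R_bits.toNat = 0 := by omega
    rw [if_neg hpos, foldl_mrStep, hlen, h0]
    rfl
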